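-- pv_equiv track=rewrite | github.com/technion-cs-nlp/irm-for-nli | natural_bias/dataset_utils.py | parse_phrase_list
-- ===== SOURCE A (Python) =====
-- def parse_phrase_list(parse, phrases):
--     if parse == "":
--         return phrases
--
--     phrase_list = phrases
--
--     words = parse.split()
--     this_phrase = []
--     next_level_parse = []
--     for index, word in enumerate(words):
--         if word == "(":
--             next_level_parse += this_phrase
--             this_phrase = ["("]
--
--         elif word == ")" and len(this_phrase) > 0 and this_phrase[0] == "(":
--             phrase_list.append(" ".join(this_phrase[1:]))
--             next_level_parse += this_phrase[1:]
--             this_phrase = []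
--         elif word == ")":
--             next_level_parse += this_phrase
--             next_level_parse.append(")")
--             this_phrase = []
--         else:
--             this_phrase.append(word)
--     return parse_phrase_list(" ".join(next_level_parse), phrase_list)
-- ===== SOURCE B (Python) =====
-- def parse_phrase_list(parse, phrases):
--     # One recursive-descent pass: record each phrase's flattened words and its
--     # subtree height, bucket by height, then output buckets in ascending order.
--     words = parse.split()
--     n = len(words)
--     buckets = []
--
--     def walk(i):
--         # scan one nesting level starting at i; stop at ')' or end of input.
--         # returns (flattened words of the level, its height, stop position)
--         content, height = [], 0
--         while i < n:
--             w = words[i]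
--             if w == "(":
--                 c, h, i = walk(i + 1)
--                 content += c
--                 if i < n:          # words[i] == ')' : the phrase is closed
--                     i += 1
--                     h += 1
--                     while len(buckets) < h:
--                         buckets.append([])
--                     buckets[h - 1].append(" ".join(c))
--                     height = max(height, h)
--                 # an unclosed '(' emits no phrase of its own
--             elif w == ")":
--                 break
--             else:
--                 content.append(w)
--                 i += 1
--         return content, height, i
--
--     i = 0
--     while i < n:
--         _, _, i = walk(i)
--         if i < n:                  # stray ')' at top level: skip it
--             i += 1
--     for b in buckets:
--         phrases.extend(b)
--     return phrases
-- ===== Notes on version B (the rewrite author's own statement) =====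
-- stated objective: alternative
-- what changed: Replaces A's level-by-level re-join/re-split recursion (one full pass over the parse per tree level) by a single recursive-descent pass that records every phrase's flattened words and subtree height and then outputs the height buckets in ascending order; Pre_ excludes token lists with an unmatched ')' , on which A recurses forever (RecursionError).
import Mathlib
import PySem

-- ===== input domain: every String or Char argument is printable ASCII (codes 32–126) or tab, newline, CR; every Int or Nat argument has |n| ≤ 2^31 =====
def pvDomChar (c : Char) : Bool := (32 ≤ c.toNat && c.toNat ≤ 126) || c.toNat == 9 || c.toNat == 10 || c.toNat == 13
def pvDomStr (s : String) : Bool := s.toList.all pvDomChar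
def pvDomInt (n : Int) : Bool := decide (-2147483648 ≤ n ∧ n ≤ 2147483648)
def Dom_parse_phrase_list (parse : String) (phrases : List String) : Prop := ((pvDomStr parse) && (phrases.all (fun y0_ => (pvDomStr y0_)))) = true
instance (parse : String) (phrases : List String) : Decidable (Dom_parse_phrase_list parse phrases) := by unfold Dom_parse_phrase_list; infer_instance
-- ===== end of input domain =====

-- B replaces A's level-by-level re-join/re-split recursion by one recursive-descent pass
-- that buckets each phrase by its subtree height; the claim is about the RETURN value
-- (in Python both A and B also append the same result phrases to the `phrases` argument).

-- ===== PORT A =====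
-- loop body of A's `for index, word in enumerate(words)`;
-- state = (phrase_list, this_phrase, next_level_parse)
def pplAstep (s : List String × List String × List String) (word : String) :
    List String × List String × List String :=
  if word = "(" then (s.1, ["("], s.2.2 ++ s.2.1)
  else if word = ")" ∧ 0 < s.2.1.length ∧ PySem.List.pyGet? s.2.1 0 = some "(" then
    (s.1 ++ [PySem.Str.join " " (PySem.List.slice s.2.1 (some 1) none)], [],
     s.2.2 ++ PySem.List.slice s.2.1 (some 1) none)
  else if word = ")" then (s.1, [], s.2.2 ++ s.2.1 ++ [")"])
  else (s.1, s.2.1 ++ [word], s.2.2)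

-- A's recursion, totalized with fuel: one call per level; under Pre_ each level has strictly
-- fewer tokens, so `token count + 2` calls always reach the "" base case (proved below)
def parse_phrase_listAux : Nat → String → List String → List String
  | 0, _, phrases => phrases
  | f + 1, parse, phrases =>
    if parse = "" then phrases
    else
      let words := PySem.Str.split₀ parse
      let st := (PySem.List.enumerate words 0).foldl (fun s iw => pplAstep s iw.2) (phrases, [], [])
      parse_phrase_listAux f (PySem.Str.join " " st.2.2) st.1

def parse_phrase_list (parse : String) (phrases : List String) : List String :=
  parse_phrase_listAux ((PySem.Str.split₀ parse).length + 2) parse phrases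

-- ===== PORT B =====
-- `while len(buckets) < n: buckets.append([])` followed by `buckets[n-1].append(s)` (n ≥ 1)
def pplPadAdd : List (List String) → Nat → String → List (List String)
  | bk, 0, _ => bk
  | [], 1, s => [[s]]
  | [], n + 2, s => [] :: pplPadAdd [] (n + 1) s
  | b :: bs, 1, s => (b ++ [s]) :: bs
  | b :: bs, n + 2, s => b :: pplPadAdd bs (n + 1) s

-- B's `walk` loop: scan one nesting level carrying (content, height), buckets threaded;
-- stops at the ")" closing the level (rest = ")" :: …) or at the end of the tokens
def pplWalk : Nat → List String → List String → Nat → List (List String) →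
    List String × Nat × List (List String) × List String
  | 0, ts, content, h, bk => (content, h, bk, ts)
  | f + 1, [], content, h, bk => (content, h, bk, [])
  | f + 1, w :: ts, content, h, bk =>
    if w = "(" then
      match pplWalk f ts [] 0 bk with
      | (c, h₁, bk₁, rest) =>
        match rest with
        | ")" :: ts₂ =>
            pplWalk f ts₂ (content ++ c) (max h (h₁ + 1))
              (pplPadAdd bk₁ (h₁ + 1) (PySem.Str.join " " c))
        | _ => (content ++ c, h, bk₁, rest)
    else if w = ")" then (content, h, bk, w :: ts)
    else pplWalk f ts (content ++ [w]) h bk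

-- B's top-level `while i < n` loop (a stray top-level ")" is skipped; outside Pre_ only)
def pplTop : Nat → List String → List (List String) → List (List String)
  | 0, _, bk => bk
  | f + 1, ts, bk =>
    if ts = [] then bk
    else
      match pplWalk ts.length ts [] 0 bk with
      | (_, _, bk₁, rest) =>
        match rest with
        | [] => bk₁
        | _ :: ts₂ => pplTop f ts₂ bk₁

def parse_phrase_list_alt (parse : String) (phrases : List String) : List String :=
  let words := PySem.Str.split₀ parse
  let buckets := pplTop (words.length + 1) words []
  phrases ++ buckets.flatten

-- ===== PRECONDITION & SPEC =====
-- prefix balance check: no prefix of the token list closes more groups than it opened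
def pplPrefOK : List String → Nat → Bool
  | [], _ => true
  | w :: ts, d =>
    if w = "(" then pplPrefOK ts (d + 1)
    else if w = ")" then
      match d with
      | 0 => false
      | d' + 1 => pplPrefOK ts d'
    else pplPrefOK ts d

-- Pre_ excludes exactly the inputs whose token list has an unmatched ")" token: there A's
-- level-to-level parse stops shrinking and A recurses forever (RecursionError).
def Pre_parse_phrase_list (parse : String) (phrases : List String) : Prop :=
  pplPrefOK (PySem.Str.split₀ parse) 0 = true
instance (parse : String) (phrases : List String) : Decidable (Pre_parse_phrase_list parse phrases) := by
  unfold Pre_parse_phrase_list; infer_instance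

def pvWitness_parse_phrase_list : String × List String := ("( a ( b ) c )", ["x"])

def Spec_parse_phrase_list (parse : String) (phrases : List String) (out : List String) : Prop := out = parse_phrase_list_alt parse phrases
instance (parse : String) (phrases : List String) (out : List String) : Decidable (Spec_parse_phrase_list parse phrases out) := by unfold Spec_parse_phrase_list; infer_instance

-- ===== CLAIM (what is proved, stated in full; the proofs are below) =====
def Claim_equal_parse_phrase_list : Prop := ∀ (parse : String) (phrases : List String), Dom_parse_phrase_list parse phrases → Pre_parse_phrase_list parse phrases → Spec_parse_phrase_list parse phrases (parse_phrase_list parse phrases)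

-- ===== LEMMAS AND PROOFS =====
structure SR where
  k : List String
  c : List String
  t : List String
  b : List (List String)
  rem : List String
  hs : Bool
  op : Bool
deriving Repr, DecidableEq

def mrg : List (List String) → List (List String) → List (List String)
  | [], ys => ys
  | x :: xs, [] => x :: xs
  | x :: xs, y :: ys => (x ++ y) :: mrg xs ys

def Sf : Nat → List String → SR
  | 0, _ => ⟨[], [], [], [], [], false, false⟩
  | _ + 1, [] => ⟨[], [], [], [], [], false, false⟩
  | f + 1, w :: ts =>
    if w = "(" then
      let r₁ := Sf f ts
      match r₁.rem with
      | ")" :: ts₂ =>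
        let r₂ := Sf f ts₂
        let ph := PySem.Str.join " " r₁.c
        ⟨(if r₁.hs then "(" :: (r₁.k ++ r₁.t) ++ ")" :: r₂.k else r₁.c ++ r₂.k),
         r₁.c ++ r₂.c, r₂.t, mrg (r₁.b ++ [[ph]]) r₂.b, r₂.rem, true, r₂.op⟩
      | _ =>
        ⟨(if r₁.hs then "(" :: r₁.k else []), r₁.c,
         (if r₁.hs then r₁.t else "(" :: r₁.t), r₁.b, r₁.rem, true, true⟩
    else if w = ")" then ⟨[], [], [], [], w :: ts, false, false⟩
    else
      let r := Sf f ts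
      ⟨(if r.hs then w :: r.k else r.k), w :: r.c, (if r.hs then r.t else w :: r.t),
       r.b, r.rem, r.hs, r.op⟩

def Sc (ts : List String) : SR := Sf ts.length ts

theorem Sf_canon : ∀ (f : Nat) (ts : List String), ts.length ≤ f →
    Sf f ts = Sc ts ∧ (∃ pre, ts = pre ++ (Sf f ts).rem) ∧
      ((Sf f ts).rem = [] ∨ ∃ u, (Sf f ts).rem = ")" :: u) := by
  intro f
  induction f using Nat.strong_induction_on with
  | _ f ih =>
    intro ts hlen
    match f, ts with
    | f, [] =>
      refine ⟨?_, ⟨[], by cases f <;> simp [Sc, Sf]⟩, ?_⟩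
      · cases f <;> simp [Sc, Sf]
      · cases f <;> simp [Sc, Sf]
    | f + 1, w :: ts' =>
      have hl' : ts'.length ≤ f := by simpa using hlen
      obtain ⟨hcan, ⟨pre₁, hpre₁⟩, hshape⟩ := ih f (Nat.lt_succ_self f) ts' hl'
      rw [hcan] at hpre₁ hshape
      have hc1 : Sf ts'.length ts' = Sc ts' := rfl
      by_cases hw : w = "("
      · subst hw
        rcases hshape with hr | ⟨u, hr⟩
        · -- unmatched branch
          refine ⟨?_, ⟨"(" :: ts', ?_⟩, ?_⟩
          · show Sf (f + 1) ("(" :: ts') = Sf (ts'.length + 1) ("(" :: ts')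
            simp only [Sf, hcan, hc1, hr]
          · simp only [Sf, hcan, hr]; simp
          · simp only [Sf, hcan, hr]; left; rfl
        · -- close branch
          have hlts₂ : u.length ≤ ts'.length := by
            rw [hr] at hpre₁
            calc u.length ≤ (")" :: u).length := by simp
              _ ≤ ts'.length := by rw [hpre₁]; simp
          have hf₂ : u.length ≤ f := le_trans hlts₂ hl'
          obtain ⟨hcan₂, ⟨pre₂, hpre₂⟩, hshape₂⟩ := ih f (Nat.lt_succ_self f) u hf₂
          rw [hcan₂] at hpre₂ hshape₂
          have hcan₂' : Sf ts'.length u = Sc u := (ih ts'.length (by omega) u hlts₂).1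
          refine ⟨?_, ⟨"(" :: pre₁ ++ [")"] ++ pre₂, ?_⟩, ?_⟩
          · show Sf (f + 1) ("(" :: ts') = Sf (ts'.length + 1) ("(" :: ts')
            simp only [Sf, hcan, hc1, hr, hcan₂, hcan₂']
          · have er : (Sf (f + 1) ("(" :: ts')).rem = (Sc u).rem := by
              simp only [Sf, hcan, hr, hcan₂]; simp
            rw [er]
            conv_lhs => rw [hpre₁, hr, hpre₂]
            simp
          · have er : (Sf (f + 1) ("(" :: ts')).rem = (Sc u).rem := by
              simp only [Sf, hcan, hr, hcan₂]; simp
            rw [er]; exact hshape₂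
      · by_cases hw2 : w = ")"
        · subst hw2
          refine ⟨?_, ⟨[], ?_⟩, ?_⟩
          · show Sf (f + 1) (")" :: ts') = Sf (ts'.length + 1) (")" :: ts')
            simp [Sf]
          · simp [Sf]
          · simp [Sf]
        · refine ⟨?_, ⟨w :: pre₁, ?_⟩, ?_⟩
          · show Sf (f + 1) (w :: ts') = Sf (ts'.length + 1) (w :: ts')
            simp only [Sf, hcan, hc1, if_neg hw, if_neg hw2]
          · have er : (Sf (f + 1) (w :: ts')).rem = (Sc ts').rem := by
              simp only [Sf, hcan, if_neg hw, if_neg hw2]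
            rw [er]
            conv_lhs => rw [hpre₁]
            simp
          · have er : (Sf (f + 1) (w :: ts')).rem = (Sc ts').rem := by
              simp only [Sf, hcan, if_neg hw, if_neg hw2]
            rw [er]; exact hshape

theorem Sc_nil : Sc [] = ⟨[], [], [], [], [], false, false⟩ := rfl

theorem Sc_suffix (ts : List String) : ∃ pre, ts = pre ++ (Sc ts).rem :=
  (Sf_canon ts.length ts le_rfl).2.1

theorem Sc_shape (ts : List String) : (Sc ts).rem = [] ∨ ∃ u, (Sc ts).rem = ")" :: u :=
  (Sf_canon ts.length ts le_rfl).2.2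

theorem Sc_rem_len (ts : List String) : (Sc ts).rem.length ≤ ts.length := by
  obtain ⟨pre, hp⟩ := Sc_suffix ts
  conv_rhs => rw [hp]
  simp

theorem Sc_stop (ts : List String) : Sc (")" :: ts) = ⟨[], [], [], [], ")" :: ts, false, false⟩ := by
  show Sf (ts.length + 1) (")" :: ts) = _
  simp [Sf]

theorem Sc_word {w : String} (hw : w ≠ "(") (hw2 : w ≠ ")") (ts : List String) :
    Sc (w :: ts) = ⟨if (Sc ts).hs then w :: (Sc ts).k else (Sc ts).k, w :: (Sc ts).c,
      if (Sc ts).hs then (Sc ts).t else w :: (Sc ts).t, (Sc ts).b, (Sc ts).rem,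
      (Sc ts).hs, (Sc ts).op⟩ := by
  show Sf (ts.length + 1) (w :: ts) = _
  simp only [Sf, if_neg hw, if_neg hw2]
  rfl

theorem Sc_open_un {ts : List String} (hr : (Sc ts).rem = []) :
    Sc ("(" :: ts) = ⟨if (Sc ts).hs then "(" :: (Sc ts).k else [], (Sc ts).c,
      if (Sc ts).hs then (Sc ts).t else "(" :: (Sc ts).t, (Sc ts).b, [], true, true⟩ := by
  show Sf (ts.length + 1) ("(" :: ts) = _
  have hc1 : Sf ts.length ts = Sc ts := rfl
  simp only [Sf, hc1, hr]
  simp [← hr]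

theorem Sc_open_cl {ts u : List String} (hr : (Sc ts).rem = ")" :: u) :
    Sc ("(" :: ts) = ⟨(if (Sc ts).hs then "(" :: ((Sc ts).k ++ (Sc ts).t) ++ ")" :: (Sc u).k
        else (Sc ts).c ++ (Sc u).k),
      (Sc ts).c ++ (Sc u).c, (Sc u).t,
      mrg ((Sc ts).b ++ [[PySem.Str.join " " (Sc ts).c]]) (Sc u).b,
      (Sc u).rem, true, (Sc u).op⟩ := by
  show Sf (ts.length + 1) ("(" :: ts) = _
  have hc1 : Sf ts.length ts = Sc ts := rfl
  have hlu : u.length ≤ ts.length := by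
    have := Sc_rem_len ts
    rw [hr] at this
    simpa using Nat.le_of_succ_le this
  have hc2 : Sf ts.length u = Sc u := (Sf_canon ts.length u hlu).1
  simp only [Sf, hc1, hr, hc2]
  simp

theorem mrg_nil_right (x : List (List String)) : mrg x [] = x := by
  cases x <;> rfl

theorem mrg_headD (x y : List (List String)) :
    (mrg x y).headD [] = x.headD [] ++ y.headD [] := by
  match x, y with
  | [], y => simp [mrg]
  | a :: as, [] => simp [mrg]
  | a :: as, b :: bs => simp [mrg]

theorem mrg_ne_nil_left {x : List (List String)} (hx : x ≠ []) (y : List (List String)) :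
    mrg x y ≠ [] := by
  match x, y with
  | [], _ => exact absurd rfl hx
  | a :: as, [] => simp [mrg]
  | a :: as, b :: bs => simp [mrg]

theorem mrg_mem_ne {x y : List (List String)} (hx : ∀ l ∈ x, l ≠ []) (hy : ∀ l ∈ y, l ≠ [])
    : ∀ l ∈ mrg x y, l ≠ [] := by
  match x, y with
  | [], y => simpa [mrg] using hy
  | a :: as, [] => simpa [mrg] using hx
  | a :: as, b :: bs =>
    intro l hl
    simp only [mrg, List.mem_cons] at hl
    rcases hl with rfl | hl
    · intro h
      rcases List.append_eq_nil_iff.mp h with ⟨h1, _⟩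
      exact hx a (by simp) h1
    · exact mrg_mem_ne (fun l hl => hx l (by simp [hl])) (fun l hl => hy l (by simp [hl])) l hl

theorem mrg_assoc (x y z : List (List String)) :
    mrg (mrg x y) z = mrg x (mrg y z) := by
  match x, y, z with
  | [], y, z => simp [mrg]
  | a :: as, [], z => simp [mrg]
  | a :: as, b :: bs, [] => simp [mrg]
  | a :: as, b :: bs, c :: cs => simp [mrg, mrg_assoc as bs cs]

theorem mrg_tail (x y : List (List String)) :
    (mrg x y).tail = mrg x.tail y.tail := by
  match x, y with
  | [], y => simp [mrg]
  | a :: as, [] => simp [mrg, mrg_nil_right]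
  | a :: as, b :: bs => simp [mrg]

theorem mrg_length (x y : List (List String)) :
    (mrg x y).length = max x.length y.length := by
  match x, y with
  | [], y => simp [mrg]
  | a :: as, [] => simp [mrg]
  | a :: as, b :: bs => simp [mrg, mrg_length as bs]

theorem Sc_invs (ts : List String) :
    (¬ (Sc ts).hs = true → (Sc ts).k = [] ∧ (Sc ts).b = [] ∧ (Sc ts).c = (Sc ts).t ∧ (Sc ts).op = false) ∧
    ((Sc ts).op = true → (Sc ts).rem = []) ∧
    ((Sc ts).op = false → ∀ w ∈ (Sc ts).t, w ≠ "(" ∧ w ≠ ")") ∧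
    (∀ l ∈ (Sc ts).b, l ≠ []) ∧
    ((Sc ts).hs = true → (Sc ts).op = false → (Sc ts).b ≠ []) ∧
    ((Sc ts).hs = true → (Sc ts).rem = [] → (Sc ts).t = [] → (Sc ts).b ≠ []) ∧
    ((Sc ts).k.length + (Sc ts).t.length + 2 * ((Sc ts).b.headD []).length + (Sc ts).rem.length ≤ ts.length) ∧
    (∀ x, (x ∈ (Sc ts).k ∨ x ∈ (Sc ts).c ∨ x ∈ (Sc ts).t) → x ∈ ts ∨ x = "(" ∨ x = ")") := by
  match ts with
  | [] => rw [Sc_nil]; simp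
  | w :: ts' =>
    by_cases hw : w = "("
    · subst hw
      obtain ⟨i1, i2, i3, i4, i5, i6, i7, i8⟩ := Sc_invs ts'
      rcases Sc_shape ts' with hr | ⟨u, hr⟩
      · -- unmatched open
        rw [Sc_open_un hr]
        rw [hr] at i7
        cases hhs : (Sc ts').hs with
        | true =>
          simp only [hhs, if_true]
          refine ⟨by simp, by simp, by simp, by simpa using i4, by simp, ?_, ?_, ?_⟩
          · intro _ _ ht
            exact i6 hhs hr ht
          · try dsimp only
            try simp only [List.length_cons, List.length_nil, List.length_append] at i7
            try simp only [List.length_cons, List.length_nil, List.length_append]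
            omega
          · intro x hx
            try dsimp only at hx
            have hx' : x = "(" ∨ (x ∈ (Sc ts').k ∨ x ∈ (Sc ts').c ∨ x ∈ (Sc ts').t) := by
              rcases hx with hx | hx | hx
              · rcases List.mem_cons.mp hx with rfl | hx
                · exact Or.inl rfl
                · exact Or.inr (Or.inl hx)
              · exact Or.inr (Or.inr (Or.inl hx))
              · exact Or.inr (Or.inr (Or.inr hx))
            rcases hx' with rfl | hx'
            · simp
            · rcases i8 x hx' with h | h
              · exact Or.inl (by simp [h])
              · exact Or.inr h
        | false =>
          simp only [hhs, Bool.false_eq_true, if_false]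
          obtain ⟨hk1, hb1, hct, _⟩ := i1 (by simp [hhs])
          refine ⟨by simp, by simp, by simp, by simpa using i4, by simp, by simp, ?_, ?_⟩
          · try dsimp only
            try simp only [List.length_cons, List.length_nil, List.length_append] at i7
            try simp only [List.length_cons, List.length_nil, List.length_append]
            omega
          · intro x hx
            try dsimp only at hx
            have hx' : x = "(" ∨ (x ∈ (Sc ts').k ∨ x ∈ (Sc ts').c ∨ x ∈ (Sc ts').t) := by
              rcases hx with hx | hx | hx
              · simp at hx
              · exact Or.inr (Or.inr (Or.inl hx))
              · rcases List.mem_cons.mp hx with rfl | hx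
                · exact Or.inl rfl
                · exact Or.inr (Or.inr (Or.inr hx))
            rcases hx' with rfl | hx'
            · simp
            · rcases i8 x hx' with h | h
              · exact Or.inl (by simp [h])
              · exact Or.inr h
      · -- closed group
        have hu : u.length < ts'.length + 1 := by
          have := Sc_rem_len ts'
          rw [hr] at this
          simp at this
          omega
        obtain ⟨j1, j2, j3, j4, j5, j6, j7, j8⟩ := Sc_invs u
        have hop1 : (Sc ts').op = false := by
          by_contra h
          have := i2 (by simpa using h)
          rw [hr] at this
          simp at this
        obtain ⟨pre₁, hpre₁⟩ := Sc_suffix ts'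
        rw [hr] at hpre₁
        have hlts' : ts'.length = pre₁.length + 1 + u.length := by
          rw [hpre₁]; simp only [List.length_append, List.length_cons]; omega
        rw [Sc_open_cl hr]
        rw [hr] at i7
        have husub : ∀ x, x ∈ u → x ∈ ts' := by
          intro x hx
          rw [hpre₁]
          simp [hx]
        have hmem : ∀ x, (x ∈ (Sc ts').k ∨ x ∈ (Sc ts').c ∨ x ∈ (Sc ts').t) ∨
            (x ∈ (Sc u).k ∨ x ∈ (Sc u).c ∨ x ∈ (Sc u).t) → x ∈ "(" :: ts' ∨ x = "(" ∨ x = ")" := by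
          intro x hx
          rcases hx with hx | hx
          · rcases i8 x hx with h | h
            · exact Or.inl (by simp [h])
            · exact Or.inr h
          · rcases j8 x hx with h | h
            · exact Or.inl (by simp [husub x h])
            · exact Or.inr h
        have hne : ∀ l ∈ mrg ((Sc ts').b ++ [[PySem.Str.join " " (Sc ts').c]]) (Sc u).b, l ≠ [] := by
          refine mrg_mem_ne ?_ j4
          intro l hl
          rcases List.mem_append.mp hl with h | h
          · exact i4 l h
          · simp at h
            simp [h]
        cases hhs : (Sc ts').hs with
        | true =>
          simp only [hhs, if_true]
          have hb1 : (Sc ts').b ≠ [] := i5 hhs hop1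
          refine ⟨by simp, by simpa using j2, by simpa using j3, by simpa using hne,
            fun _ _ => mrg_ne_nil_left (by simp) _, fun _ _ _ => mrg_ne_nil_left (by simp) _, ?_, ?_⟩
          · try dsimp only
            rw [mrg_headD]
            have hhd : (((Sc ts').b ++ [[PySem.Str.join " " (Sc ts').c]]).headD []).length = ((Sc ts').b.headD []).length := by
              cases hb : (Sc ts').b with
              | nil => exact absurd hb hb1
              | cons a as => simp
            try simp only [List.length_append]
            rw [hhd]
            try simp only [List.length_cons, List.length_nil, List.length_append] at i7
            try simp only [List.length_cons, List.length_nil, List.length_append]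
            omega
          · intro x hx
            try dsimp only at hx
            rcases hx with hx | hx | hx
            · rcases List.mem_cons.mp hx with rfl | hx
              · exact Or.inr (Or.inl rfl)
              · rcases List.mem_append.mp hx with h | h
                · rcases List.mem_append.mp h with h' | h'
                  · exact hmem x (Or.inl (Or.inl h'))
                  · exact hmem x (Or.inl (Or.inr (Or.inr h')))
                · rcases List.mem_cons.mp h with rfl | h
                  · exact Or.inr (Or.inr rfl)
                  · exact hmem x (Or.inr (Or.inl h))
            · rcases List.mem_append.mp hx with h | h
              · exact hmem x (Or.inl (Or.inr (Or.inl h)))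
              · exact hmem x (Or.inr (Or.inr (Or.inl h)))
            · exact hmem x (Or.inr (Or.inr (Or.inr hx)))
        | false =>
          simp only [hhs, Bool.false_eq_true, if_false]
          obtain ⟨hk1, hb1, hct, _⟩ := i1 (by simp [hhs])
          refine ⟨by simp, by simpa using j2, by simpa using j3, by simpa using hne,
            fun _ _ => mrg_ne_nil_left (by simp) _, fun _ _ _ => mrg_ne_nil_left (by simp) _, ?_, ?_⟩
          · try dsimp only
            rw [hb1, hct]
            try simp only [List.nil_append]
            rw [mrg_headD]
            try simp only [List.headD_cons]
            rw [hk1] at i7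
            try simp only [List.length_cons, List.length_nil, List.length_append] at i7
            try simp only [List.length_cons, List.length_nil, List.length_append]
            omega
          · intro x hx
            try dsimp only at hx
            refine hmem x ?_
            rcases hx with hx | hx | hx
            · rcases List.mem_append.mp hx with h | h
              · exact Or.inl (Or.inr (Or.inl h))
              · exact Or.inr (Or.inl h)
            · rcases List.mem_append.mp hx with h | h
              · exact Or.inl (Or.inr (Or.inl h))
              · exact Or.inr (Or.inr (Or.inl h))
            · exact Or.inr (Or.inr (Or.inr hx))
    · by_cases hw2 : w = ")"
      · subst hw2
        rw [Sc_stop]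
        simp
      · obtain ⟨i1, i2, i3, i4, i5, i6, i7, i8⟩ := Sc_invs ts'
        rw [Sc_word hw hw2]
        have hmem : ∀ x, x = w ∨ (x ∈ (Sc ts').k ∨ x ∈ (Sc ts').c ∨ x ∈ (Sc ts').t) → x ∈ w :: ts' ∨ x = "(" ∨ x = ")" := by
          intro x hx
          rcases hx with rfl | hx
          · simp
          · rcases i8 x hx with h | h
            · exact Or.inl (by simp [h])
            · exact Or.inr h
        cases hhs : (Sc ts').hs with
        | true =>
          simp only [hhs, if_true]
          refine ⟨by simp, by simpa using i2, ?_, by simpa using i4, by simpa using i5 hhs, ?_, ?_, ?_⟩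
          · intro hop x hx
            exact i3 hop x hx
          · intro _ hrem ht
            exact i6 hhs hrem ht
          · try dsimp only
            try simp only [List.length_cons, List.length_nil, List.length_append] at i7
            try simp only [List.length_cons, List.length_nil, List.length_append]
            omega
          · intro x hx
            try dsimp only at hx
            refine hmem x ?_
            rcases hx with hx | hx | hx
            · rcases List.mem_cons.mp hx with rfl | hx
              · exact Or.inl rfl
              · exact Or.inr (Or.inl hx)
            · rcases List.mem_cons.mp hx with rfl | hx
              · exact Or.inl rfl
              · exact Or.inr (Or.inr (Or.inl hx))
            · exact Or.inr (Or.inr (Or.inr hx))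
        | false =>
          simp only [hhs, Bool.false_eq_true, if_false]
          obtain ⟨hk1, hb1, hct, hop⟩ := i1 (by simp [hhs])
          refine ⟨?_, by simpa using i2, ?_, by simpa using i4, by simp, ?_, ?_, ?_⟩
          · intro _
            exact ⟨hk1, hb1, by simp [hct], hop⟩
          · intro hop' x hx
            rcases List.mem_cons.mp hx with rfl | hx
            · exact ⟨hw, hw2⟩
            · exact i3 hop' x hx
          · intro hhs' _ _
            simp at hhs'
          · try dsimp only
            try simp only [List.length_cons, List.length_nil, List.length_append] at i7
            try simp only [List.length_cons, List.length_nil, List.length_append]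
            omega
          · intro x hx
            try dsimp only at hx
            refine hmem x ?_
            rcases hx with hx | hx | hx
            · exact Or.inr (Or.inl hx)
            · rcases List.mem_cons.mp hx with rfl | hx
              · exact Or.inl rfl
              · exact Or.inr (Or.inr (Or.inl hx))
            · rcases List.mem_cons.mp hx with rfl | hx
              · exact Or.inl rfl
              · exact Or.inr (Or.inr (Or.inr hx))
  termination_by ts.length
  decreasing_by all_goals (simp_wf <;> try simp only [List.length_cons]) <;> omega

theorem Sc_words (ts : List String) (h : ∀ w ∈ ts, w ≠ "(" ∧ w ≠ ")") :
    Sc ts = ⟨[], ts, ts, [], [], false, false⟩ := by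
  match ts with
  | [] => exact Sc_nil
  | w :: ts' =>
    have hw := h w (by simp)
    have ih := Sc_words ts' (fun x hx => h x (by simp [hx]))
    rw [Sc_word hw.1 hw.2, ih]
    simp

theorem Sc_stab (ts ys u : List String) (h : (Sc ts).rem = ")" :: u) :
    Sc (ts ++ ys) = { Sc ts with rem := ")" :: (u ++ ys) } := by
  match ts with
  | [] => rw [Sc_nil] at h; simp at h
  | w :: ts' =>
    by_cases hw : w = "("
    · subst hw
      rcases Sc_shape ts' with hr1 | ⟨v, hr1⟩
      · rw [Sc_open_un hr1] at h
        simp at h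
      · rw [Sc_open_cl hr1] at h
        dsimp only at h
        have hv : v.length < ts'.length + 1 := by
          have := Sc_rem_len ts'
          rw [hr1] at this
          simp at this
          omega
        have hu : u.length < v.length + 1 := by
          have := Sc_rem_len v
          rw [h] at this
          simp at this
          omega
        have e1 := Sc_stab ts' ys v hr1
        have e2 := Sc_stab v ys u h
        have hr1' : (Sc (ts' ++ ys)).rem = ")" :: (v ++ ys) := by rw [e1]
        show Sc ("(" :: (ts' ++ ys)) = _
        rw [Sc_open_cl hr1', e1, e2, Sc_open_cl hr1]
    · by_cases hw2 : w = ")"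
      · subst hw2
        rw [Sc_stop] at h
        dsimp only at h
        have hts : ts' = u := by injection h
        subst hts
        show Sc (")" :: (ts' ++ ys)) = _
        rw [Sc_stop, Sc_stop]
      · rw [Sc_word hw hw2] at h
        dsimp only at h
        have e1 := Sc_stab ts' ys u h
        show Sc (w :: (ts' ++ ys)) = _
        rw [Sc_word hw hw2, e1, Sc_word hw hw2]
  termination_by ts.length
  decreasing_by all_goals (simp_wf <;> try simp only [List.length_cons]) <;> omega

def comb (r₁ r₂ : SR) : SR :=
  ⟨(if r₂.hs then r₁.k ++ (r₁.t ++ r₂.k) else r₁.k), r₁.c ++ r₂.c,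
   (if r₂.hs then r₂.t else r₁.t ++ r₂.t), mrg r₁.b r₂.b, r₂.rem, r₁.hs || r₂.hs, r₂.op⟩

theorem Sc_append (ts ys : List String) (hrem : (Sc ts).rem = []) (hop : (Sc ts).op = false) :
    Sc (ts ++ ys) = comb (Sc ts) (Sc ys) := by
  match ts with
  | [] =>
    rw [List.nil_append, Sc_nil]
    have hinv := (Sc_invs ys).1
    rcases hE : Sc ys with ⟨ky, cy, ty, by', remy, hsy, opy⟩
    rw [hE] at hinv
    cases hsy with
    | true => simp [comb, mrg]
    | false =>
      obtain ⟨hk, _, _, _⟩ := hinv (by simp)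
      simp only at hk
      simp [comb, mrg, hk]
  | w :: ts' =>
    by_cases hw : w = "("
    · subst hw
      rcases Sc_shape ts' with hr1 | ⟨v, hr1⟩
      · rw [Sc_open_un hr1] at hop
        simp at hop
      · rw [Sc_open_cl hr1] at hrem hop
        dsimp only at hrem hop
        have hv : v.length < ts'.length + 1 := by
          have := Sc_rem_len ts'
          rw [hr1] at this
          simp at this
          omega
        have e1 := Sc_stab ts' ys v hr1
        have hr1' : (Sc (ts' ++ ys)).rem = ")" :: (v ++ ys) := by rw [e1]
        have e2 := Sc_append v ys hrem hop
        show Sc ("(" :: (ts' ++ ys)) = _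
        rw [Sc_open_cl hr1', e1, e2, Sc_open_cl hr1]
        cases hhs1 : (Sc ts').hs with
        | true => cases hhsy : (Sc ys).hs <;> simp [comb, mrg_assoc, hhs1, hhsy]
        | false =>
          obtain ⟨hk1, hb1, hct1, _⟩ := (Sc_invs ts').1 (by simp [hhs1])
          cases hhsy : (Sc ys).hs <;> simp [comb, mrg_assoc, hhs1, hhsy, hk1, hb1, hct1]
    · by_cases hw2 : w = ")"
      · subst hw2
        rw [Sc_stop] at hrem
        simp at hrem
      · rw [Sc_word hw hw2] at hrem hop
        dsimp only at hrem hop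
        have e1 := Sc_append ts' ys hrem hop
        show Sc (w :: (ts' ++ ys)) = _
        rw [Sc_word hw hw2, e1, Sc_word hw hw2]
        cases hhs1 : (Sc ts').hs with
        | true => cases hhsy : (Sc ys).hs <;> simp [comb, hhs1, hhsy]
        | false =>
          obtain ⟨hk1, hb1, hct1, _⟩ := (Sc_invs ts').1 (by simp [hhs1])
          cases hhsy : (Sc ys).hs <;> simp [comb, hhs1, hhsy, hk1, hb1, hct1]
  termination_by ts.length
  decreasing_by all_goals (simp_wf <;> try simp only [List.length_cons]) <;> omega

theorem astep_word {w : String} (s : List String × List String × List String)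
    (hw : w ≠ "(") (hw2 : w ≠ ")") : pplAstep s w = (s.1, s.2.1 ++ [w], s.2.2) := by
  simp [pplAstep, hw, hw2]

theorem astep_open (s : List String × List String × List String) :
    pplAstep s "(" = (s.1, ["("], s.2.2 ++ s.2.1) := by
  simp [pplAstep]

theorem astep_close_lone (s : List String × List String × List String)
    (h : ∀ x ∈ s.2.1, x ≠ "(") : pplAstep s ")" = (s.1, [], s.2.2 ++ s.2.1 ++ [")"]) := by
  have hcond : ¬ (")" = ")" ∧ 0 < s.2.1.length ∧ PySem.List.pyGet? s.2.1 0 = some "(") := by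
    rintro ⟨-, hlen, hget⟩
    cases hl : s.2.1 with
    | nil => rw [hl] at hlen; simp at hlen
    | cons a as =>
      have ha : a ≠ "(" := h a (by simp [hl])
      rw [hl] at hget
      simp [PySem.List.pyGet?, PySem.List.pyIdx?] at hget
      exact ha hget
  unfold pplAstep
  rw [if_neg (by decide : ¬((")" : String) = "(")), if_neg hcond, if_pos rfl]

theorem astep_close_emit (xs : List String) (s : List String × List String × List String)
    (h : s.2.1 = "(" :: xs) :
    pplAstep s ")" = (s.1 ++ [PySem.Str.join " " xs], [], s.2.2 ++ xs) := by
  have hsl : PySem.List.slice s.2.1 (some 1) none = xs := by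
    rw [h, PySem.List.slice_from ("(" :: xs) (by norm_num : (0:Int) ≤ 1)]
    rfl
  have hget : PySem.List.pyGet? s.2.1 0 = some "(" := by
    rw [h]
    have := PySem.List.pyGet?_natCast ("(" :: xs) 0
    simpa using this
  have hcond : (")" = ")" ∧ 0 < s.2.1.length ∧ PySem.List.pyGet? s.2.1 0 = some "(") :=
    ⟨rfl, by rw [h]; simp, hget⟩
  unfold pplAstep
  rw [if_neg (by decide : ¬((")" : String) = "(")), if_pos hcond, hsl]

theorem A_pass (ts : List String) : ∀ pl this nl : List String,
    List.foldl pplAstep (pl, this, nl) ts =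
      List.foldl pplAstep
        (pl ++ (Sc ts).b.headD [],
         (if (Sc ts).hs then (Sc ts).t else this ++ (Sc ts).t),
         (if (Sc ts).hs then nl ++ this ++ (Sc ts).k else nl)) (Sc ts).rem := by
  intro pl this nl
  match ts with
  | [] => rw [Sc_nil]; simp
  | w :: ts' =>
    by_cases hw : w = "("
    · subst hw
      have hstep : List.foldl pplAstep (pl, this, nl) ("(" :: ts') =
          List.foldl pplAstep (pl, ["("], nl ++ this) ts' := by
        rw [List.foldl_cons, astep_open]
      rcases Sc_shape ts' with hr1 | ⟨v, hr1⟩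
      · -- unmatched
        rw [hstep, A_pass ts' pl ["("] (nl ++ this), hr1, Sc_open_un hr1]
        dsimp only
        cases hhs1 : (Sc ts').hs with
        | true => simp
        | false =>
          obtain ⟨hk1, hb1, hct1, _⟩ := (Sc_invs ts').1 (by simp [hhs1])
          simp [hb1]
      · -- closed group
        have hv : v.length < ts'.length + 1 := by
          have := Sc_rem_len ts'
          rw [hr1] at this
          simp at this
          omega
        have hop1 : (Sc ts').op = false := by
          by_contra hcon
          have := (Sc_invs ts').2.1 (by simpa using hcon)
          rw [hr1] at this
          simp at this
        rw [hstep, A_pass ts' pl ["("] (nl ++ this), hr1, Sc_open_cl hr1]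
        dsimp only
        rw [List.foldl_cons]
        cases hhs1 : (Sc ts').hs with
        | true =>
          have hb1 : (Sc ts').b ≠ [] := (Sc_invs ts').2.2.2.2.1 hhs1 hop1
          have htw : ∀ x ∈ (Sc ts').t, x ≠ "(" := by
            intro x hx
            exact ((Sc_invs ts').2.2.1 hop1 x hx).1
          rw [astep_close_lone _ (by simpa using htw)]
          rw [A_pass v]
          rw [mrg_headD]
          have hhd : ((Sc ts').b ++ [[PySem.Str.join " " (Sc ts').c]]).headD [] = (Sc ts').b.headD [] := by
            cases hb : (Sc ts').b with
            | nil => exact absurd hb hb1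
            | cons a as => simp
          rw [hhd]
          cases hhsv : (Sc v).hs with
          | true => simp
          | false =>
            obtain ⟨hkv, hbv, hctv, _⟩ := (Sc_invs v).1 (by simp [hhsv])
            simp [hkv, hbv]
        | false =>
          obtain ⟨hk1, hb1, hct1, _⟩ := (Sc_invs ts').1 (by simp [hhs1])
          rw [astep_close_emit (Sc ts').t _ (by simp)]
          rw [A_pass v]
          rw [mrg_headD, hb1]
          rw [← hct1]
          cases hhsv : (Sc v).hs with
          | true => simp
          | false =>
            obtain ⟨hkv, hbv, hctv, _⟩ := (Sc_invs v).1 (by simp [hhsv])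
            simp [hkv, hbv]
    · by_cases hw2 : w = ")"
      · subst hw2
        rw [Sc_stop]
        simp
      · rw [List.foldl_cons, astep_word _ hw hw2]
        dsimp only
        rw [A_pass ts' pl (this ++ [w]) nl, Sc_word hw hw2]
        dsimp only
        cases hhs1 : (Sc ts').hs with
        | true => simp
        | false =>
          obtain ⟨hk1, hb1, hct1, _⟩ := (Sc_invs ts').1 (by simp [hhs1])
          simp [hb1]
  termination_by ts.length
  decreasing_by all_goals (simp_wf <;> try simp only [List.length_cons]) <;> omega

theorem tail_append_ne {b : List (List String)} (hb : b ≠ []) (x : List (List String)) :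
    (b ++ x).tail = b.tail ++ x := by
  cases b with
  | nil => exact absurd rfl hb
  | cons a as => simp

theorem Sc_shift (ts : List String) :
    (Sc (Sc ts).k).b = (Sc ts).b.tail ∧
    (Sc (Sc ts).k).rem = [] ∧
    ((Sc ts).op = false → (Sc (Sc ts).k).op = false ∧ (Sc (Sc ts).k).c ++ (Sc ts).t = (Sc ts).c) := by
  match ts with
  | [] => rw [Sc_nil]; simp [Sc_nil]
  | w :: ts' =>
    by_cases hw : w = "("
    · subst hw
      rcases Sc_shape ts' with hr1 | ⟨v, hr1⟩
      · -- unmatched open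
        obtain ⟨ihb, ihrem, ihop⟩ := Sc_shift ts'
        rw [Sc_open_un hr1]
        dsimp only
        cases hhs1 : (Sc ts').hs with
        | true =>
          rw [if_pos rfl]
          rw [Sc_open_un ihrem]
          refine ⟨by dsimp only; exact ihb, by dsimp only, by simp⟩
        | false =>
          rw [if_neg (by simp)]
          obtain ⟨hk1, hb1, hct1, _⟩ := (Sc_invs ts').1 (by simp [hhs1])
          rw [Sc_nil, hb1]
          simp
      · -- closed group
        have hv : v.length < ts'.length + 1 := by
          have := Sc_rem_len ts'
          rw [hr1] at this
          simp at this
          omega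
        have hop1 : (Sc ts').op = false := by
          by_contra hcon
          have := (Sc_invs ts').2.1 (by simpa using hcon)
          rw [hr1] at this
          simp at this
        have htw : ∀ x ∈ (Sc ts').t, x ≠ "(" ∧ x ≠ ")" := (Sc_invs ts').2.2.1 hop1
        have hwords := Sc_words (Sc ts').t htw
        obtain ⟨ihb, ihrem, ihop⟩ := Sc_shift ts'
        obtain ⟨ihop', ihc⟩ := ihop hop1
        obtain ⟨jhb, jhrem, jhop⟩ := Sc_shift v
        rw [Sc_open_cl hr1]
        dsimp only
        cases hhs1 : (Sc ts').hs with
        | true =>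
          rw [if_pos rfl]
          have hb1 : (Sc ts').b ≠ [] := (Sc_invs ts').2.2.2.2.1 hhs1 hop1
          have ea : Sc ((Sc ts').k ++ (Sc ts').t) = comb (Sc (Sc ts').k) (Sc (Sc ts').t) :=
            Sc_append _ _ ihrem ihop'
          have eb : Sc (((Sc ts').k ++ (Sc ts').t) ++ ")" :: (Sc v).k) =
              comb (Sc ((Sc ts').k ++ (Sc ts').t)) (Sc (")" :: (Sc v).k)) := by
            refine Sc_append _ _ ?_ ?_
            · rw [ea, hwords]; simp [comb]
            · rw [ea, hwords]; simp [comb]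
          have hrX : (Sc (((Sc ts').k ++ (Sc ts').t) ++ ")" :: (Sc v).k)).rem = ")" :: (Sc v).k := by
            rw [eb, ea, hwords, Sc_stop]
            simp [comb]
          have hgoal : ("(" :: ((Sc ts').k ++ (Sc ts').t) ++ ")" :: (Sc v).k) =
              "(" :: (((Sc ts').k ++ (Sc ts').t) ++ ")" :: (Sc v).k) := by simp
          rw [hgoal, Sc_open_cl hrX]
          dsimp only
          rw [eb, ea, hwords, Sc_stop]
          refine ⟨?_, by simpa [comb] using jhrem, ?_⟩
          · -- buckets
            dsimp [comb]
            rw [mrg_nil_right, mrg_nil_right]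
            simp only [List.append_nil]
            rw [ihc]
            rw [mrg_tail, tail_append_ne hb1, ihb, jhb]
          · intro hopv
            dsimp [comb]
            refine ⟨(jhop hopv).1, ?_⟩
            simp only [List.append_nil]
            rw [ihc, List.append_assoc, (jhop hopv).2]
        | false =>
          rw [if_neg (by simp)]
          obtain ⟨hk1, hb1, hct1, _⟩ := (Sc_invs ts').1 (by simp [hhs1])
          have ea : Sc ((Sc ts').c ++ (Sc v).k) = comb (Sc (Sc ts').c) (Sc (Sc v).k) :=
            Sc_append _ _ (by rw [hct1, hwords]) (by rw [hct1, hwords])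
          refine ⟨?_, ?_, ?_⟩
          · rw [ea]
            dsimp only [comb]
            rw [hct1, hwords, hb1, jhb]
            simp [mrg_tail, mrg]
          · rw [ea]
            dsimp [comb]
            exact jhrem
          · intro hopv
            rw [ea]
            dsimp [comb]
            refine ⟨(jhop hopv).1, ?_⟩
            rw [hct1, hwords]
            dsimp
            rw [List.append_assoc, (jhop hopv).2]
    · by_cases hw2 : w = ")"
      · subst hw2
        rw [Sc_stop]
        simp [Sc_nil]
      · obtain ⟨ihb, ihrem, ihop⟩ := Sc_shift ts'
        rw [Sc_word hw hw2]
        dsimp only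
        cases hhs1 : (Sc ts').hs with
        | true =>
          rw [if_pos rfl]
          rw [Sc_word hw hw2]
          dsimp only
          refine ⟨ihb, ihrem, ?_⟩
          intro hop1
          obtain ⟨o1, o2⟩ := ihop hop1
          refine ⟨o1, ?_⟩
          simp only [List.cons_append, if_true]
          rw [o2]
        | false =>
          rw [if_neg (by simp)]
          obtain ⟨hk1, hb1, hct1, _⟩ := (Sc_invs ts').1 (by simp [hhs1])
          rw [hk1, Sc_nil, hb1]
          dsimp only
          refine ⟨rfl, rfl, ?_⟩
          intro _
          refine ⟨rfl, ?_⟩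
          rw [hct1]
          simp
  termination_by ts.length
  decreasing_by all_goals (simp_wf <;> try simp only [List.length_cons]) <;> omega

theorem Sc_klen (ts : List String) (hrem : (Sc ts).rem = []) (hne : ts ≠ []) :
    (Sc ts).k.length < ts.length := by
  obtain ⟨i1, i2, i3, i4, i5, i6, i7, i8⟩ := Sc_invs ts
  have htsl : 0 < ts.length := List.length_pos_iff.mpr hne
  cases hhs : (Sc ts).hs with
  | false =>
    obtain ⟨hk, _, _, _⟩ := i1 (by simp [hhs])
    rw [hk]
    simpa using htsl
  | true =>
    by_cases ht : (Sc ts).t = []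
    · have hb := i6 hhs hrem ht
      have hhd : 0 < ((Sc ts).b.headD []).length := by
        cases hb' : (Sc ts).b with
        | nil => exact absurd hb' hb
        | cons a as =>
          have : a ≠ [] := i4 a (by simp [hb'])
          simp [List.length_pos_iff, this]
      rw [hrem] at i7
      simp only [List.length_nil, Nat.add_zero] at i7
      omega
    · have htl : 0 < (Sc ts).t.length := List.length_pos_iff.mpr ht
      rw [hrem] at i7
      simp only [List.length_nil, Nat.add_zero] at i7
      omega

theorem Sc_R (ts : List String) : ∀ (d : Nat), pplPrefOK ts d = true →
    ((Sc ts).rem = [] ∨ ∃ u d', d = d' + 1 ∧ (Sc ts).rem = ")" :: u ∧ pplPrefOK u d' = true) := by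
  match ts with
  | [] => intro d _; left; rw [Sc_nil]
  | w :: ts' =>
    intro d hpre
    by_cases hw : w = "("
    · subst hw
      have hpre' : pplPrefOK ts' (d + 1) = true := by
        simp only [pplPrefOK] at hpre
        simpa using hpre
      rcases Sc_R ts' (d + 1) hpre' with hr1 | ⟨u, d', hd, hr1, hpu⟩
      · left
        rw [Sc_open_un hr1]
      · have hd' : d' = d := by omega
        rw [hd'] at hpu
        have hv : u.length < ts'.length + 1 := by
          have := Sc_rem_len ts'
          rw [hr1] at this
          simp at this
          omega
        rcases Sc_R u d hpu with h2 | ⟨u2, d2, hd2, h2, hpu2⟩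
        · left
          rw [Sc_open_cl hr1]
          simpa using h2
        · right
          refine ⟨u2, d2, hd2, ?_, hpu2⟩
          rw [Sc_open_cl hr1]
          simpa using h2
    · by_cases hw2 : w = ")"
      · subst hw2
        simp only [pplPrefOK] at hpre
        cases d with
        | zero => simp at hpre
        | succ d' =>
          right
          refine ⟨ts', d', rfl, by rw [Sc_stop], ?_⟩
          simpa using hpre
      · have hpre' : pplPrefOK ts' d = true := by
          simp only [pplPrefOK] at hpre
          simpa [hw, hw2] using hpre
        rcases Sc_R ts' d hpre' with h1 | ⟨u, d', hd, h1, hpu⟩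
        · left
          rw [Sc_word hw hw2]
          simpa using h1
        · right
          refine ⟨u, d', hd, ?_, hpu⟩
          rw [Sc_word hw hw2]
          simpa using h1
  termination_by ts.length
  decreasing_by all_goals (simp_wf <;> try simp only [List.length_cons]) <;> omega

theorem Sc_rem_of_prefOK (ts : List String) (h : pplPrefOK ts 0 = true) : (Sc ts).rem = [] := by
  rcases Sc_R ts 0 h with h1 | ⟨u, d', hd, _, _⟩
  · exact h1
  · omega

theorem padAdd_mrg (s : String) : ∀ (y x : List (List String)),
    pplPadAdd (mrg x y) (y.length + 1) s = mrg x (y ++ [[s]]) := by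
  intro y
  induction y with
  | nil =>
    intro x
    cases x with
    | nil => rfl
    | cons a as => simp [mrg_nil_right, pplPadAdd, mrg]
  | cons b bs ih =>
    intro x
    cases x with
    | nil =>
      show pplPadAdd (b :: bs) (bs.length + 2) s = (b :: bs) ++ [[s]]
      rw [pplPadAdd]
      have := ih []
      simp [mrg] at this
      rw [this]
      simp
    | cons a as =>
      show pplPadAdd ((a ++ b) :: mrg as bs) (bs.length + 2) s = mrg (a :: as) ((b :: bs) ++ [[s]])
      rw [pplPadAdd]
      rw [ih as]
      rfl

theorem B_walk (ts : List String) : ∀ (f : Nat) (content : List String) (h : Nat)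
    (bk : List (List String)), ts.length ≤ f →
    ((∀ u, (Sc ts).rem = ")" :: u →
      pplWalk f ts content h bk =
        (content ++ (Sc ts).c, max h (Sc ts).b.length, mrg bk (Sc ts).b, (Sc ts).rem)) ∧
     ((Sc ts).rem = [] → ∃ H, pplWalk f ts content h bk =
        (content ++ (Sc ts).c, H, mrg bk (Sc ts).b, []))) := by
  match ts with
  | [] =>
    intro f content h bk _
    rw [Sc_nil]
    constructor
    · intro u hu
      simp at hu
    · intro _
      refine ⟨h, ?_⟩
      cases f <;> simp [pplWalk, mrg_nil_right]
  | w :: ts' =>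
    intro f content h bk hf
    match f with
    | f' + 1 =>
    have hf' : ts'.length ≤ f' := by simpa using hf
    by_cases hw : w = "("
    · subst hw
      rcases Sc_shape ts' with hr1 | ⟨v, hr1⟩
      · -- unmatched open: inner walk consumes everything
        obtain ⟨H1, e1⟩ := (B_walk ts' f' [] 0 bk hf').2 hr1
        rw [Sc_open_un hr1]
        constructor
        · intro u hu
          simp at hu
        · intro _
          refine ⟨h, ?_⟩
          show pplWalk (f' + 1) ("(" :: ts') content h bk = _
          rw [pplWalk]
          simp only [if_pos rfl]
          rw [e1]
          simp
      · -- closed group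
        have hv : v.length < ts'.length + 1 := by
          have := Sc_rem_len ts'
          rw [hr1] at this
          simp at this
          omega
        have e1 := (B_walk ts' f' [] 0 bk hf').1 v hr1
        have hvf : v.length ≤ f' := by omega
        have hpad : pplPadAdd (mrg bk (Sc ts').b) ((Sc ts').b.length + 1)
            (PySem.Str.join " " (Sc ts').c) =
            mrg bk ((Sc ts').b ++ [[PySem.Str.join " " (Sc ts').c]]) := padAdd_mrg _ _ _
        have hstep : pplWalk (f' + 1) ("(" :: ts') content h bk =
            pplWalk f' v (content ++ (Sc ts').c) (max h ((Sc ts').b.length + 1))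
              (mrg bk ((Sc ts').b ++ [[PySem.Str.join " " (Sc ts').c]])) := by
          simp only [pplWalk, if_pos rfl]
          rw [e1, hr1]
          dsimp only
          simp only [List.nil_append, Nat.zero_max]
          rw [hpad]
          simp
        obtain ⟨ihv1, ihv2⟩ := B_walk v f' (content ++ (Sc ts').c)
          (max h ((Sc ts').b.length + 1))
          (mrg bk ((Sc ts').b ++ [[PySem.Str.join " " (Sc ts').c]])) hvf
        rw [Sc_open_cl hr1]
        constructor
        · intro u hu
          dsimp only at hu
          have hmax : max (max h ((Sc ts').b.length + 1)) (Sc v).b.length =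
              max h (mrg ((Sc ts').b ++ [[PySem.Str.join " " (Sc ts').c]]) (Sc v).b).length := by
            rw [mrg_length]
            simp only [List.length_append, List.length_cons, List.length_nil]
            omega
          rw [hstep, ihv1 u hu, hmax, mrg_assoc]
          simp [List.append_assoc]
        · intro hrem0
          dsimp only at hrem0
          obtain ⟨H, e⟩ := ihv2 hrem0
          refine ⟨H, ?_⟩
          rw [hstep, e, mrg_assoc]
          simp [List.append_assoc]
    · by_cases hw2 : w = ")"
      · subst hw2
        rw [Sc_stop]
        constructor
        · intro u hu
          dsimp only at hu
          have hu' : u = ts' := by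
            have := hu.symm
            injection this
          subst hu'
          simp only [pplWalk]
          simp [mrg_nil_right]
        · intro h0
          dsimp only at h0
          simp at h0
      · have hstepw : pplWalk (f' + 1) (w :: ts') content h bk =
            pplWalk f' ts' (content ++ [w]) h bk := by
          simp only [pplWalk]
          simp [hw, hw2]
        obtain ⟨ih1, ih2⟩ := B_walk ts' f' (content ++ [w]) h bk hf'
        rw [Sc_word hw hw2]
        constructor
        · intro u hu
          dsimp only at hu
          rw [hstepw, ih1 u hu]
          dsimp only
          simp
        · intro h0
          dsimp only at h0
          obtain ⟨H, e⟩ := ih2 h0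
          refine ⟨H, ?_⟩
          rw [hstepw, e]
          simp
  termination_by ts.length
  decreasing_by all_goals (simp_wf <;> try simp only [List.length_cons]) <;> omega

theorem B_top (ws : List String) (bk : List (List String)) (hrem : (Sc ws).rem = []) :
    pplTop (ws.length + 1) ws bk = mrg bk (Sc ws).b := by
  cases ws with
  | nil => rw [Sc_nil]; simp [pplTop, mrg_nil_right]
  | cons w ts =>
    obtain ⟨H, e⟩ := (B_walk (w :: ts) (w :: ts).length [] 0 bk le_rfl).2 hrem
    simp only [pplTop]
    rw [if_neg (by simp)]
    rw [e]

def wfTok (w : String) : Prop :=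
  w.toList ≠ [] ∧ ∀ c ∈ w.toList, PySem.Chars.isspace c = false

theorem go_word (w : List Char) (hw2 : ∀ c ∈ w, PySem.Chars.isspace c = false) :
    ∀ (rest cur : List Char) (accl : List (List Char)),
    PySem.Chars.split₀.go (w ++ rest) cur accl = PySem.Chars.split₀.go rest (w.reverse ++ cur) accl := by
  induction w with
  | nil => intro rest cur accl; simp
  | cons a w' ih =>
    intro rest cur accl
    have ha : PySem.Chars.isspace a = false := hw2 a (by simp)
    show PySem.Chars.split₀.go (a :: (w' ++ rest)) cur accl = _
    rw [PySem.Chars.split₀.go]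
    rw [ha]
    simp only [Bool.false_eq_true, if_false]
    rw [ih (fun c hc => hw2 c (by simp [hc])) rest (a :: cur) accl]
    congr 1
    simp

theorem go_words (ps : List (List Char)) (h : ∀ p ∈ ps, p ≠ [] ∧ ∀ c ∈ p, PySem.Chars.isspace c = false) :
    ∀ (acc : List (List Char)),
    PySem.Chars.split₀.go (PySem.Chars.join [' '] ps) [] acc = acc.reverse ++ ps := by
  match ps with
  | [] =>
    intro acc
    rw [PySem.Chars.join_nil, PySem.Chars.split₀.go]
    simp
  | [p] =>
    intro acc
    obtain ⟨hp1, hp2⟩ := h p (by simp)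
    rw [PySem.Chars.join_singleton]
    rw [show (p : List Char) = p ++ [] by simp]
    rw [go_word p hp2 [] [] acc]
    rw [PySem.Chars.split₀.go]
    rw [if_neg (by simp [List.isEmpty_iff, hp1])]
    simp
  | p :: q :: ps' =>
    intro acc
    obtain ⟨hp1, hp2⟩ := h p (by simp)
    rw [PySem.Chars.join_cons_cons]
    rw [List.append_assoc, show ([' '] ++ PySem.Chars.join [' '] (q :: ps') : List Char) =
      ' ' :: PySem.Chars.join [' '] (q :: ps') from rfl]
    rw [go_word p hp2 _ [] acc]
    rw [PySem.Chars.split₀.go]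
    have hsp : PySem.Chars.isspace ' ' = true := by decide
    rw [hsp]
    simp only [if_true]
    rw [if_neg (by simp [List.isEmpty_iff, hp1])]
    have hgw := go_words (q :: ps') (fun x hx => h x (List.mem_cons_of_mem _ hx)) ((p.reverse ++ []).reverse :: acc)
    rw [hgw]
    simp

theorem split_join (ws : List String) (h : ∀ w ∈ ws, wfTok w) :
    PySem.Str.split₀ (PySem.Str.join " " ws) = ws := by
  unfold PySem.Str.split₀
  rw [PySem.Str.toList_join]
  unfold PySem.Chars.split₀
  rw [show (" " : String).toList = [' '] from rfl]
  rw [go_words (ws.map String.toList) (by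
    intro p hp
    obtain ⟨w, hw, rfl⟩ := List.mem_map.mp hp
    exact (h w hw).imp id (fun hh => hh))]
  simp only [List.reverse_nil, List.nil_append]
  rw [List.map_map]
  have : (String.ofList ∘ String.toList) = id := by
    funext s
    simp [String.ofList_toList]
  rw [this, List.map_id]

theorem go_wf : ∀ (cs cur : List Char) (acc : List (List Char)),
    (∀ p ∈ acc, p ≠ [] ∧ ∀ c ∈ p, PySem.Chars.isspace c = false) →
    (∀ c ∈ cur, PySem.Chars.isspace c = false) →
    ∀ p ∈ PySem.Chars.split₀.go cs cur acc, p ≠ [] ∧ ∀ c ∈ p, PySem.Chars.isspace c = false := by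
  intro cs
  induction cs with
  | nil =>
    intro cur acc hacc hcur p hp
    rw [PySem.Chars.split₀.go] at hp
    by_cases hc : cur.isEmpty = true
    · rw [if_pos hc] at hp
      exact hacc p (by simpa using hp)
    · rw [if_neg hc] at hp
      simp only [List.mem_reverse, List.mem_cons] at hp
      rcases hp with rfl | hp
      · constructor
        · simp only [ne_eq, List.reverse_eq_nil_iff]
          simpa [List.isEmpty_iff] using hc
        · intro c hcmem
          exact hcur c (by simpa using hcmem)
      · exact hacc p hp
  | cons a rest ih =>
    intro cur acc hacc hcur p hp
    rw [PySem.Chars.split₀.go] at hp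
    by_cases ha : PySem.Chars.isspace a = true
    · rw [ha] at hp
      simp only [if_true] at hp
      by_cases hc : cur.isEmpty = true
      · rw [if_pos hc] at hp
        exact ih [] acc hacc (by simp) p hp
      · rw [if_neg hc] at hp
        refine ih [] (cur.reverse :: acc) ?_ (by simp) p hp
        intro q hq
        rcases List.mem_cons.mp hq with rfl | hq
        · constructor
          · simp only [ne_eq, List.reverse_eq_nil_iff]
            simpa [List.isEmpty_iff] using hc
          · intro c hcmem
            exact hcur c (by simpa using hcmem)
        · exact hacc q hq
    · rw [Bool.not_eq_true] at ha
      rw [ha] at hp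
      simp only [Bool.false_eq_true, if_false] at hp
      refine ih (a :: cur) acc hacc ?_ p hp
      intro c hcmem
      rcases List.mem_cons.mp hcmem with rfl | hcmem
      · exact ha
      · exact hcur c hcmem

theorem split_wf (s : String) : ∀ w ∈ PySem.Str.split₀ s, wfTok w := by
  intro w hw
  unfold PySem.Str.split₀ PySem.Chars.split₀ at hw
  obtain ⟨p, hp, rfl⟩ := List.mem_map.mp hw
  have := go_wf s.toList [] [] (by simp) (by simp) p hp
  exact ⟨by simpa [String.toList_ofList] using this.1, by simpa [String.toList_ofList] using this.2⟩

theorem join_ne_empty (w : String) (ws : List String) (h : wfTok w) :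
    PySem.Str.join " " (w :: ws) ≠ "" := by
  intro hcon
  have : (PySem.Str.join " " (w :: ws)).toList = [] := by rw [hcon]; rfl
  rw [PySem.Str.toList_join] at this
  cases ws with
  | nil =>
    rw [List.map_cons, List.map_nil, PySem.Chars.join_singleton] at this
    exact h.1 this
  | cons w2 ws' =>
    rw [List.map_cons, List.map_cons, PySem.Chars.join_cons_cons] at this
    rcases List.append_eq_nil_iff.mp this with ⟨h1, -⟩
    rcases List.append_eq_nil_iff.mp h1 with ⟨-, h2⟩
    simp at h2

theorem enum_fold (ws : List String) (init : List String × List String × List String) :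
    (PySem.List.enumerate ws 0).foldl (fun s iw => pplAstep s iw.2) init = ws.foldl pplAstep init := by
  have h2 : (PySem.List.enumerate ws 0).map Prod.snd = ws := PySem.List.map_snd_enumerate ws 0
  conv_rhs => rw [← h2]
  rw [List.foldl_map]

theorem flatten_headD (b : List (List String)) : b.flatten = b.headD [] ++ b.tail.flatten := by
  cases b <;> simp

theorem wfTok_paren_open : wfTok "(" := by
  constructor
  · simp
  · intro c hc
    simp at hc
    subst hc
    decide

theorem wfTok_paren_close : wfTok ")" := by
  constructor
  · simp
  · intro c hc
    simp at hc
    subst hc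
    decide

theorem A_pass_full (ws ph : List String) (hrem : (Sc ws).rem = []) :
    ws.foldl pplAstep (ph, [], []) =
      (ph ++ (Sc ws).b.headD [],
       (Sc ws).t,
       (if (Sc ws).hs then (Sc ws).k else [])) := by
  have := A_pass ws ph [] []
  rw [hrem] at this
  rw [this]
  cases hhs : (Sc ws).hs <;> simp

theorem A_multi : ∀ (f : Nat) (ws ph : List String),
    (∀ w ∈ ws, wfTok w) → (Sc ws).rem = [] → ws.length < f →
    parse_phrase_listAux f (PySem.Str.join " " ws) ph = ph ++ (Sc ws).b.flatten := by
  intro f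
  induction f with
  | zero => intro ws ph _ _ hlen; omega
  | succ f ih =>
    intro ws ph hwf hrem hlen
    cases hws : ws with
    | nil =>
      rw [show PySem.Str.join " " [] = "" from rfl]
      rw [parse_phrase_listAux]
      rw [if_pos rfl, Sc_nil]
      simp
    | cons w ws' =>
      subst hws
      have hne := join_ne_empty w ws' (hwf w (by simp))
      rw [parse_phrase_listAux, if_neg hne]
      simp only
      rw [split_join _ hwf]
      rw [enum_fold, A_pass_full _ ph hrem]
      simp only
      -- the next-level parse is (Sc ws).k in both hs-cases
      have hk : (if (Sc (w :: ws')).hs then (Sc (w :: ws')).k else []) = (Sc (w :: ws')).k := by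
        cases hhs : (Sc (w :: ws')).hs with
        | true => simp
        | false =>
          obtain ⟨hk1, _, _, _⟩ := (Sc_invs (w :: ws')).1 (by simp [hhs])
          simp [hk1]
      rw [hk]
      obtain ⟨ihb, ihrem, _⟩ := Sc_shift (w :: ws')
      have hwfk : ∀ x ∈ (Sc (w :: ws')).k, wfTok x := by
        intro x hx
        rcases (Sc_invs (w :: ws')).2.2.2.2.2.2.2 x (Or.inl hx) with h | h | h
        · exact hwf x h
        · rw [h]; exact wfTok_paren_open
        · rw [h]; exact wfTok_paren_close
      have hklen : (Sc (w :: ws')).k.length < (w :: ws').length := Sc_klen _ hrem (by simp)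
      rw [ih _ _ hwfk ihrem (by omega)]
      rw [ihb]
      rw [List.append_assoc, ← flatten_headD]

theorem A_eq_B (parse : String) (phrases : List String)
    (hpre : pplPrefOK (PySem.Str.split₀ parse) 0 = true) :
    parse_phrase_list parse phrases = parse_phrase_list_alt parse phrases := by
  unfold parse_phrase_list parse_phrase_list_alt
  by_cases hp : parse = ""
  · subst hp
    rw [show PySem.Str.split₀ "" = [] from rfl]
    rw [parse_phrase_listAux, if_pos rfl]
    simp [pplTop]
  · have hwf := split_wf parse
    have hrem := Sc_rem_of_prefOK _ hpre
    rw [parse_phrase_listAux, if_neg hp]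
    simp only
    rw [enum_fold, A_pass_full _ phrases hrem]
    simp only
    have hk : (if (Sc (PySem.Str.split₀ parse)).hs then (Sc (PySem.Str.split₀ parse)).k else []) =
        (Sc (PySem.Str.split₀ parse)).k := by
      cases hhs : (Sc (PySem.Str.split₀ parse)).hs with
      | true => simp
      | false =>
        obtain ⟨hk1, _, _, _⟩ := (Sc_invs (PySem.Str.split₀ parse)).1 (by simp [hhs])
        simp [hk1]
    rw [hk]
    rw [B_top _ [] hrem]
    rw [show mrg [] (Sc (PySem.Str.split₀ parse)).b = (Sc (PySem.Str.split₀ parse)).b from rfl]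
    obtain ⟨ihb, ihrem, _⟩ := Sc_shift (PySem.Str.split₀ parse)
    have hwfk : ∀ x ∈ (Sc (PySem.Str.split₀ parse)).k, wfTok x := by
      intro x hx
      rcases (Sc_invs (PySem.Str.split₀ parse)).2.2.2.2.2.2.2 x (Or.inl hx) with h | h | h
      · exact hwf x h
      · rw [h]; exact wfTok_paren_open
      · rw [h]; exact wfTok_paren_close
    have hklen : (Sc (PySem.Str.split₀ parse)).k.length < (PySem.Str.split₀ parse).length + 1 := by
      by_cases hnil : PySem.Str.split₀ parse = []
      · rw [hnil, Sc_nil]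
        simp
      · have := Sc_klen _ hrem hnil
        omega
    rw [A_multi _ _ _ hwfk ihrem hklen]
    rw [ihb]
    rw [List.append_assoc, ← flatten_headD]

-- ===== VERDICT (by name: the statement is the Claim_ definition above) =====
theorem parse_phrase_list_spec : Claim_equal_parse_phrase_list := by
  intro parse phrases _ hpre
  unfold Spec_parse_phrase_list
  exact A_eq_B parse phrases hpre
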